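-- pv_equiv track=rewrite | github.com/BogdanTurbal/geom_lab | gen_rand_2.py | sort_ortho_poly
-- ===== SOURCE A (Python) =====
-- def sort_ortho_poly(boundary):
--     def explore(curr, set_b, sb):
--         for x, y in [[0, 1], [1, 0], [-1, 0], [0, -1]]:
--             nxt = (curr[0] + x, curr[1] + y)
--             if nxt in set_b:
--                 sb.append(nxt)
--                 set_b.remove(nxt)
--                 explore(nxt, set_b, sb)
--         return sb
--
--     set_b = set(boundary)
--     curr = boundary[0]
--     set_b.remove(curr)
--     sb = [curr]
--
--     return explore(curr, set_b, sb)
-- ===== SOURCE B (Python) =====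
-- def sort_ortho_poly(boundary):
--     dirs = [(0, 1), (1, 0), (-1, 0), (0, -1)]
--     set_b = set(boundary)
--     curr = boundary[0]
--     set_b.remove(curr)
--     sb = [curr]
--     stack = [(curr, dirs)]
--     while stack:
--         node, rem = stack[-1]
--         if not rem:
--             stack.pop()
--             continue
--         stack[-1] = (node, rem[1:])
--         dx, dy = rem[0]
--         nxt = (node[0] + dx, node[1] + dy)
--         if nxt in set_b:
--             sb.append(nxt)
--             set_b.remove(nxt)
--             stack.append((nxt, dirs))
--     return sb
-- ===== Notes on version B (the rewrite author's own statement) =====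
-- stated objective: alternative
-- what changed: The recursive DFS explore() is replaced by an explicit-stack iteration whose frames hold (node, remaining directions), emulating the call stack so the preorder append sequence is identical; no recursion (and no recursion-depth limit).
import Mathlib
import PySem

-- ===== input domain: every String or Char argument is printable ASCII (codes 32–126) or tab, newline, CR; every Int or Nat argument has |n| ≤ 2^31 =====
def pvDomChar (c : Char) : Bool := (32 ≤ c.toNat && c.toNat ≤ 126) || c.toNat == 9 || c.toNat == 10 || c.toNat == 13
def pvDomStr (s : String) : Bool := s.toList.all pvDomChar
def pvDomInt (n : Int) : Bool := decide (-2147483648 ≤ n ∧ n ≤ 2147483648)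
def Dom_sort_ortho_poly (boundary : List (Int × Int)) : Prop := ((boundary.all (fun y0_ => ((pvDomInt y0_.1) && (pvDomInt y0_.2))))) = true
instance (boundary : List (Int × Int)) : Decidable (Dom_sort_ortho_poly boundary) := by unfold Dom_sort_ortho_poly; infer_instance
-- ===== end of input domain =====

-- B replaces A's recursive DFS with an explicit stack of (node, remaining-directions) frames
-- that emulates the call stack, producing the identical preorder append sequence iteratively.

-- the direction list [[0,1],[1,0],[-1,0],[0,-1]] shared by both programs
def pvDirs : List (Int × Int) := [(0, 1), (1, 0), (-1, 0), (0, -1)]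

-- ===== PORT A =====
-- explore(curr, set_b, sb): the for-loop over directions is the recursion on ds; the nested
-- explore call is the fuel-decrementing call (fuel only makes the recursion total: the caller
-- passes boundary.length, strictly more than the set size, so the 0-fuel branch is unreachable).
-- set_b.remove(nxt) after a successful membership test is PySem.Set.discard (no KeyError possible).
def exploreA : Nat → (Int × Int) → List (Int × Int) → PySem.Set (Int × Int) → List (Int × Int) →
    PySem.Set (Int × Int) × List (Int × Int)
  | 0, _, _, s, sb => (s, sb)
  | f + 1, curr, ds, s, sb =>
    match ds with
    | [] => (s, sb)
    | d :: ds' =>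
      let nxt := (curr.1 + d.1, curr.2 + d.2)
      if PySem.Set.contains s nxt then
        let p := exploreA f nxt pvDirs (PySem.Set.discard s nxt) (sb ++ [nxt])
        exploreA (f + 1) curr ds' p.1 p.2
      else
        exploreA (f + 1) curr ds' s sb
  termination_by f _ ds _ _ => (f, ds.length)

def sort_ortho_poly (boundary : List (Int × Int)) : List (Int × Int) :=
  match boundary with
  | [] => []  -- Python raises IndexError on boundary[0]; excluded by Pre_
  | curr :: _ =>
    -- set_b = set(boundary); set_b.remove(curr): curr ∈ set_b, so remove = discard
    let s := PySem.Set.discard (PySem.Set.ofList boundary) curr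
    (exploreA boundary.length curr pvDirs s [curr]).2

-- ===== PORT B =====
-- needed by runB's decreasing_by: removing a present element strictly shrinks the set
theorem pvDiscardLengthLt {s : PySem.Set (Int × Int)} {x : Int × Int}
    (h : PySem.Set.contains s x = true) :
    (PySem.Set.discard s x).length < s.length := by
  have hx : x ∈ s := by
    simpa [PySem.Set.contains] using h
  simp only [PySem.Set.discard]
  exact List.length_filter_lt_length_iff_exists.mpr ⟨x, hx, by simp⟩

-- the while-loop of Source B: stack frames are (node, remaining directions)
def runB (s : PySem.Set (Int × Int)) (sb : List (Int × Int))
    (stack : List ((Int × Int) × List (Int × Int))) : List (Int × Int) :=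
  match stack with
  | [] => sb
  | (_, []) :: rest => runB s sb rest
  | (node, d :: ds) :: rest =>
    let nxt := (node.1 + d.1, node.2 + d.2)
    if h : PySem.Set.contains s nxt = true then
      runB (PySem.Set.discard s nxt) (sb ++ [nxt]) ((nxt, pvDirs) :: (node, ds) :: rest)
    else
      runB s sb ((node, ds) :: rest)
  termination_by 5 * s.length + (stack.map (fun fr => fr.2.length + 1)).sum
  decreasing_by
  · simp
  · have h2 : (PySem.Set.discard s (node.1 + d.1, node.2 + d.2)).length < s.length :=
      pvDiscardLengthLt h
    simp [pvDirs]; omega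
  · simp

def sort_ortho_poly_alt (boundary : List (Int × Int)) : List (Int × Int) :=
  match boundary with
  | [] => []  -- Source B raises IndexError on boundary[0]; excluded by Pre_
  | curr :: _ =>
    runB (PySem.Set.discard (PySem.Set.ofList boundary) curr) [curr] [(curr, pvDirs)]

-- ===== PRECONDITION & SPEC =====
-- A evaluates boundary[0]: on the empty list it raises IndexError (so does B); excluded.
def Pre_sort_ortho_poly (boundary : List (Int × Int)) : Prop := boundary ≠ []
instance (boundary : List (Int × Int)) : Decidable (Pre_sort_ortho_poly boundary) := by
  unfold Pre_sort_ortho_poly; infer_instance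

def pvWitness_sort_ortho_poly : (List (Int × Int)) := [(0, 0), (0, 1)]

def Spec_sort_ortho_poly (boundary : List (Int × Int)) (out : List (Int × Int)) : Prop :=
  out = sort_ortho_poly_alt boundary
instance (boundary : List (Int × Int)) (out : List (Int × Int)) :
    Decidable (Spec_sort_ortho_poly boundary out) := by unfold Spec_sort_ortho_poly; infer_instance

-- ===== CLAIM (what is proved, stated in full; the proofs are below) =====
def Claim_equal_sort_ortho_poly : Prop := ∀ (boundary : List (Int × Int)),
  Dom_sort_ortho_poly boundary → Pre_sort_ortho_poly boundary →
  Spec_sort_ortho_poly boundary (sort_ortho_poly boundary)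

-- ===== LEMMAS AND PROOFS =====
-- exploreA only removes elements: the resulting set is no larger than the input set
theorem lenA (f : Nat) (curr : Int × Int) (ds : List (Int × Int))
    (s : PySem.Set (Int × Int)) (sb : List (Int × Int)) :
    (exploreA f curr ds s sb).1.length ≤ s.length := by
  induction f, curr, ds, s, sb using exploreA.induct with
  | case1 => simp [exploreA]
  | case2 => simp [exploreA]
  | case3 f curr s sb d ds nxt hc p ih1 ih2 ih3 =>
    rw [exploreA]
    have hc' : s.contains (curr.1 + d.1, curr.2 + d.2) = true := hc
    simp only [hc', if_true]
    refine le_trans ih3 (le_trans ih1 ?_)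
    exact List.length_filter_le _ _
  | case4 f curr s sb d ds nxt hc ih =>
    rw [exploreA]
    have hc' : ¬ s.contains (curr.1 + d.1, curr.2 + d.2) = true := hc
    simp only [hc']
    exact ih

-- the simulation: processing one stack frame of runB computes exactly exploreA on that frame
theorem mainSim (f : Nat) : ∀ (s : PySem.Set (Int × Int)) (curr : Int × Int)
    (ds : List (Int × Int)) (sb : List (Int × Int))
    (rest : List ((Int × Int) × List (Int × Int))),
    s.length < f →
    runB s sb ((curr, ds) :: rest) =
      runB (exploreA f curr ds s sb).1 (exploreA f curr ds s sb).2 rest := by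
  induction f with
  | zero => intro s curr ds sb rest h; omega
  | succ f ih =>
    intro s curr ds sb rest
    induction ds generalizing s sb rest with
    | nil =>
      intro h
      rw [exploreA, runB]
    | cons d ds' ihds =>
      intro h
      rw [exploreA, runB]
      by_cases hc : PySem.Set.contains s (curr.1 + d.1, curr.2 + d.2) = true
      · simp only [hc, if_true, dif_pos]
        rw [ih _ _ _ _ _ (by
          have := pvDiscardLengthLt hc
          omega)]
        rw [ihds _ _ _ (by
          have h1 := lenA f (curr.1 + d.1, curr.2 + d.2) pvDirs
            (PySem.Set.discard s (curr.1 + d.1, curr.2 + d.2)) (sb ++ [(curr.1 + d.1, curr.2 + d.2)])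
          have h2 := pvDiscardLengthLt hc
          omega)]
      · simp only [hc]
        exact ihds _ _ _ h

-- ===== VERDICT (by name: the statement is the Claim_ definition above) =====
theorem sort_ortho_poly_spec : Claim_equal_sort_ortho_poly := by
  intro boundary _ hne
  unfold Spec_sort_ortho_poly
  match boundary with
  | [] => exact absurd rfl hne
  | c :: t =>
    simp only [sort_ortho_poly, sort_ortho_poly_alt]
    rw [mainSim ((c :: t).length) _ _ _ _ _ (by
      have hm : c ∈ PySem.Set.ofList (c :: t) := by
        simp [PySem.Set.mem_ofList]
      have h1 : (PySem.Set.discard (PySem.Set.ofList (c :: t)) c).length <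
          (PySem.Set.ofList (c :: t)).length := by
        apply pvDiscardLengthLt
        simp [PySem.Set.contains, hm]
      have h2 := PySem.Set.length_ofList_le (c :: t)
      omega)]
    rw [runB]
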